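-- pv_equiv track=rewrite | github.com/sakehl/HaliVerExperiments | preprocess.py | count_schedule_directives
-- ===== SOURCE A (Python) =====
-- from collections import Counter, defaultdict
--
-- def count_schedule_directives(line: str)-> Counter[str]:
--     directives = {"parallel", "vectorize", "unroll",
--                   "split", "tile" , "fuse", "reorder",
--                   "compute_root", "compute_at",
--                   "store_at", "store_root",
--                   "fold_storage","compute_with","prefetch",
--                   "bound_extent", "bound", "rename", "update"}
--     result = Counter()
--     for d in directives:
--         i = line.count("."+d+"(")
--         if(i > 0):
--             result[d] += 1
--     return result
-- ===== SOURCE B (Python) =====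
-- from collections import Counter
--
-- _DIRECTIVES = ("parallel", "vectorize", "unroll",
--                "split", "tile", "fuse", "reorder",
--                "compute_root", "compute_at",
--                "store_at", "store_root",
--                "fold_storage", "compute_with", "prefetch",
--                "bound_extent", "bound", "rename", "update")
--
-- def count_schedule_directives(line: str) -> Counter:
--     # single left-to-right scan: collect every dot-word-parenthesis call token, then keep the directives
--     found = set()
--     n = len(line)
--     i = 0
--     while i < n:
--         if line[i] == '.':
--             j = i + 1
--             while j < n and (line[j].isalnum() or line[j] == '_'):
--                 j += 1
--             if j < n and line[j] == '(':
--                 found.add(line[i + 1:j])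
--             i = j
--         else:
--             i += 1
--     return Counter({d: 1 for d in _DIRECTIVES if d in found})
-- ===== Notes on version B (the rewrite author's own statement) =====
-- stated objective: alternative
-- what changed: Instead of running one substring scan of the line per directive (18 passes), B scans the line once left-to-right collecting every dot-word-parenthesis call token into a set and then filters the fixed directive list against it.
import Mathlib
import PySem

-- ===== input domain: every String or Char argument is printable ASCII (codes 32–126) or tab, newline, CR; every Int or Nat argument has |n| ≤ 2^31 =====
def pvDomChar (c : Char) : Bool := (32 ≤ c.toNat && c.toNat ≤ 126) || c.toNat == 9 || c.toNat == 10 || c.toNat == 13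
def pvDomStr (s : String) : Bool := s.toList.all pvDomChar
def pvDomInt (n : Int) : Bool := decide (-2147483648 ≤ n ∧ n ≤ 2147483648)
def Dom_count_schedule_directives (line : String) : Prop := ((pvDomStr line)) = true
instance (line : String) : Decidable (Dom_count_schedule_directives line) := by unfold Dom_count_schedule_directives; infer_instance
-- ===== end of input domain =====

-- B replaces A's per-directive substring scans by ONE left-to-right scan collecting every dot-word-parenthesis call token,
-- then filters the fixed directive list against that set (objective: alternative single-pass algorithm).

-- the fixed directive set (shared literal data; A iterates it, B filters it)
def pvDirectives : List String :=
  ["parallel", "vectorize", "unroll",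
   "split", "tile", "fuse", "reorder",
   "compute_root", "compute_at",
   "store_at", "store_root",
   "fold_storage", "compute_with", "prefetch",
   "bound_extent", "bound", "rename", "update"]

-- ===== PORT A =====
def count_schedule_directives (line : String) : List (String × Int) :=
  (pvDirectives.foldl
    (fun result d =>
      if 0 < PySem.Str.count line ("." ++ d ++ "(") then
        PySem.Dict.modify result d 0 (· + 1)
      else result)
    PySem.Dict.empty).items

-- ===== PORT B =====
-- line[j].isalnum() or line[j] == '_'   (exact on the ASCII domain)
def pvIsWordChar (c : Char) : Bool := c.isAlphanum || c == '_'

-- the while-loop of B: at '.', skip the maximal word run (the inner while), record it if '(' follows, resume at j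
def pvScan (found : PySem.Set String) : List Char → PySem.Set String
  | [] => found
  | c :: cs =>
    if c = '.' then
      let rest := cs.dropWhile pvIsWordChar
      let found' :=
        if rest.head? = some '(' then
          PySem.Set.add found (String.ofList (cs.takeWhile pvIsWordChar))
        else found
      pvScan found' rest
    else pvScan found cs
  termination_by l => l.length
  decreasing_by
  · exact Nat.lt_succ_of_le (List.length_dropWhile_le _ _)
  · exact Nat.lt_succ_self _

def count_schedule_directives_alt (line : String) : List (String × Int) :=
  let found := pvScan PySem.Set.empty line.toList
  (pvDirectives.filter (fun d => PySem.Set.contains found d)).map (fun d => (d, (1 : Int)))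

-- ===== PRECONDITION & SPEC =====
def Spec_count_schedule_directives (line : String) (out : List (String × Int)) : Prop := out = count_schedule_directives_alt line
instance (line : String) (out : List (String × Int)) : Decidable (Spec_count_schedule_directives line out) := by unfold Spec_count_schedule_directives; infer_instance

-- ===== CLAIM (what is proved, stated in full; the proofs are below) =====
def Claim_equal_count_schedule_directives : Prop := ∀ (line : String), Dom_count_schedule_directives line → Spec_count_schedule_directives line (count_schedule_directives line)

-- ===== LEMMAS AND PROOFS =====

-- the pattern A looks for, as a char list: '.' ++ d ++ '('
def pvPat (d : String) : List Char := '.' :: (d.toList ++ ['('])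

-- step equations for pvScan
theorem pvScan_dot (found : PySem.Set String) (cs : List Char) :
    pvScan found ('.' :: cs) =
      pvScan (if (cs.dropWhile pvIsWordChar).head? = some '(' then
                PySem.Set.add found (String.ofList (cs.takeWhile pvIsWordChar))
              else found) (cs.dropWhile pvIsWordChar) := by
  rw [pvScan]; simp

theorem pvScan_other (found : PySem.Set String) (c : Char) (cs : List Char) (hc : ¬ c = '.') :
    pvScan found (c :: cs) = pvScan found cs := by
  rw [pvScan, if_neg hc]

-- accumulator of count.go only grows
theorem pvGo_ge (sub : List Char) (fuel : Nat) (l : List Char) (acc : Nat) :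
    acc ≤ PySem.Chars.count.go sub fuel l acc := by
  induction fuel generalizing l acc with
  | zero => simp [PySem.Chars.count.go]
  | succ fuel ih =>
    cases l with
    | nil => simp [PySem.Chars.count.go]
    | cons h t =>
      rw [PySem.Chars.count.go]
      split
      · exact le_trans (Nat.le_succ acc) (ih _ _)
      · exact ih _ _

theorem pvExists_drop_cons (p : List Char) (x : Char) (l : List Char) :
    (∃ j, p <+: (x :: l).drop j) ↔ p <+: (x :: l) ∨ ∃ j, p <+: l.drop j := by
  constructor
  · rintro ⟨j, h⟩
    cases j with
    | zero => exact Or.inl h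
    | succ j => exact Or.inr ⟨j, h⟩
  · rintro (h | ⟨j, h⟩)
    · exact ⟨0, h⟩
    · exact ⟨j + 1, h⟩

theorem pvGo_pos_iff (sub : List Char) (hsub : sub ≠ []) (fuel : Nat) (l : List Char)
    (hf : l.length ≤ fuel) (acc : Nat) :
    acc < PySem.Chars.count.go sub fuel l acc ↔ ∃ j, sub <+: l.drop j := by
  induction fuel generalizing l acc with
  | zero =>
    have : l = [] := List.eq_nil_of_length_eq_zero (Nat.le_zero.mp hf)
    subst this
    simp [PySem.Chars.count.go, List.prefix_iff_eq_take, hsub]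
  | succ fuel ih =>
    cases l with
    | nil => simp [PySem.Chars.count.go, List.prefix_iff_eq_take, hsub]
    | cons h t =>
      rw [PySem.Chars.count.go]
      split
      · rename_i hpre
        constructor
        · intro _
          exact ⟨0, List.isPrefixOf_iff_prefix.mp hpre⟩
        · intro _
          exact lt_of_lt_of_le (Nat.lt_succ_self acc) (pvGo_ge _ _ _ _)
      · rename_i hpre
        have hnp : ¬ sub <+: (h :: t) := fun hc => hpre (List.isPrefixOf_iff_prefix.mpr hc)
        rw [ih t (Nat.le_of_succ_le_succ hf) acc, pvExists_drop_cons]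
        simp [hnp]

theorem pvCount_pos_iff (s sub : List Char) (hsub : sub ≠ []) :
    0 < PySem.Chars.count s sub ↔ ∃ j, sub <+: s.drop j := by
  rw [PySem.Chars.count]
  simp only [List.isEmpty_iff, hsub, if_false]
  exact pvGo_pos_iff sub hsub s.length s (le_refl _) 0

-- occurrences of the pattern in cs are exactly occurrences past the leading word run
theorem pvOcc_shift (d : String) (cs : List Char) :
    (∃ j, pvPat d <+: cs.drop j) ↔ ∃ j, pvPat d <+: (cs.dropWhile pvIsWordChar).drop j := by
  constructor
  · rintro ⟨j, h⟩
    by_cases hj : (cs.takeWhile pvIsWordChar).length ≤ j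
    · refine ⟨j - (cs.takeWhile pvIsWordChar).length, ?_⟩
      have key := List.drop_length_add_append
        (l₁ := cs.takeWhile pvIsWordChar) (l₂ := cs.dropWhile pvIsWordChar)
        (j - (cs.takeWhile pvIsWordChar).length)
      rw [List.takeWhile_append_dropWhile, Nat.add_sub_cancel' hj] at key
      rwa [key] at h
    · exfalso
      have hj' : j < (cs.takeWhile pvIsWordChar).length := Nat.lt_of_not_le hj
      have hjcs : j < cs.length := lt_of_lt_of_le hj' (List.takeWhile_prefix _).length_le
      rw [List.drop_eq_getElem_cons hjcs, pvPat] at h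
      have hhead := (List.cons_prefix_cons.mp h).1
      have heq : cs = cs.takeWhile pvIsWordChar ++ cs.dropWhile pvIsWordChar :=
        (List.takeWhile_append_dropWhile).symm
      have hmem : cs[j] ∈ cs.takeWhile pvIsWordChar := by
        rw [List.getElem_of_eq heq hjcs, List.getElem_append_left hj']
        exact List.getElem_mem hj'
      have hword := List.mem_takeWhile_imp hmem
      rw [← hhead] at hword
      exact absurd hword (by decide)
  · rintro ⟨j, h⟩
    refine ⟨(cs.takeWhile pvIsWordChar).length + j, ?_⟩
    have key := List.drop_length_add_append
      (l₁ := cs.takeWhile pvIsWordChar) (l₂ := cs.dropWhile pvIsWordChar) j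
    rw [List.takeWhile_append_dropWhile] at key
    rwa [key]

-- the pattern heads a '.'-line iff the maximal word token equals d and '(' follows
theorem pvHead_match (d : String) (hw : ∀ c ∈ d.toList, pvIsWordChar c = true) (cs : List Char) :
    (pvPat d <+: ('.' :: cs)) ↔
      (cs.takeWhile pvIsWordChar = d.toList ∧ ∃ r, cs.dropWhile pvIsWordChar = '(' :: r) := by
  have hpar : pvIsWordChar '(' = false := by decide
  constructor
  · intro h
    rw [pvPat, List.cons_prefix_cons] at h
    obtain ⟨rest', hrest⟩ := h.2
    have hcs : cs = d.toList ++ ('(' :: rest') := by rw [← hrest]; simp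
    subst hcs
    refine ⟨?_, rest', ?_⟩
    · rw [List.takeWhile_append_of_pos hw, List.takeWhile_cons_of_neg (by simp [hpar])]
      simp
    · rw [List.dropWhile_append_of_pos hw, List.dropWhile_cons_of_neg (by simp [hpar])]
  · rintro ⟨htok, r, hrest⟩
    rw [pvPat, List.cons_prefix_cons]
    refine ⟨rfl, r, ?_⟩
    conv_rhs => rw [← List.takeWhile_append_dropWhile (p := pvIsWordChar) (l := cs)]
    rw [htok, hrest]
    simp

-- main scan characterisation: d is found iff it was already in, or ".d(" occurs in the rest of the line
theorem pvMem_scan (d : String) (hw : ∀ c ∈ d.toList, pvIsWordChar c = true)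
    (l : List Char) (found : PySem.Set String) :
    d ∈ pvScan found l ↔ d ∈ found ∨ ∃ j, pvPat d <+: l.drop j := by
  induction hn : l.length using Nat.strong_induction_on generalizing l found with
  | _ n ih =>
  cases l with
  | nil => simp [pvScan, pvPat]
  | cons c cs =>
    subst hn
    by_cases hc : c = '.'
    · subst hc
      have hlen : (cs.dropWhile pvIsWordChar).length < ('.' :: cs).length :=
        Nat.lt_succ_of_le (List.length_dropWhile_le _ _)
      rw [pvScan_dot, pvExists_drop_cons, pvHead_match d hw cs, pvOcc_shift d cs]
      rcases hrest : cs.dropWhile pvIsWordChar with _ | ⟨r0, rtail⟩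
      · rw [if_neg (by simp), ih _ (by rw [← hrest]; exact hlen) _ _ rfl]
        simp [pvPat]
      · by_cases hp : r0 = '('
        · subst hp
          rw [if_pos (by simp), ih _ (by rw [← hrest]; exact hlen) _ _ rfl, PySem.Set.mem_add]
          constructor
          · rintro ((hf | htok) | hocc)
            · exact Or.inl hf
            · refine Or.inr (Or.inl ⟨?_, rtail, rfl⟩)
              rw [htok, String.toList_ofList]
            · exact Or.inr (Or.inr hocc)
          · rintro (hf | ⟨⟨htok, r, hr⟩ | hocc⟩)
            · exact Or.inl (Or.inl hf)
            · refine Or.inl (Or.inr ?_)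
              rw [htok, String.ofList_toList]
            · exact Or.inr hocc
        · rw [if_neg (by simp [hp]), ih _ (by rw [← hrest]; exact hlen) _ _ rfl]
          constructor
          · rintro (hf | hocc)
            · exact Or.inl hf
            · exact Or.inr (Or.inr hocc)
          · rintro (hf | ⟨⟨htok, r, hr⟩ | hocc⟩)
            · exact Or.inl hf
            · exact absurd (List.head_eq_of_cons_eq hr) hp
            · exact Or.inr hocc
    · rw [pvScan_other found c cs hc, ih cs.length (Nat.lt_succ_self _) _ _ rfl,
        pvExists_drop_cons]
      have hnp : ¬ pvPat d <+: (c :: cs) := by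
        rw [pvPat, List.cons_prefix_cons]
        rintro ⟨h1, -⟩
        exact hc h1.symm
      simp only [hnp, false_or]

-- per-directive condition equivalence between A's substring test and B's found set
theorem pvCond_eq (line d : String) (hw : ∀ c ∈ d.toList, pvIsWordChar c = true) :
    decide (0 < PySem.Str.count line ("." ++ d ++ "(")) =
      PySem.Set.contains (pvScan PySem.Set.empty line.toList) d := by
  rw [Bool.eq_iff_iff]
  simp only [decide_eq_true_eq]
  have hpat : ("." ++ d ++ "(").toList = pvPat d := by simp [String.toList_append, pvPat]
  rw [PySem.Str.count_eq, hpat, pvCount_pos_iff _ _ (by simp [pvPat])]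
  have hmem : PySem.Set.contains (pvScan PySem.Set.empty line.toList) d = true ↔
      d ∈ pvScan PySem.Set.empty line.toList := by
    simp [PySem.Set.contains]
  rw [hmem, pvMem_scan d hw]
  simp [PySem.Set.empty]

-- A's counting fold over distinct fresh keys produces exactly the filtered (d, 1) list
theorem pvFold_items (p : String → Prop) [DecidablePred p] (ds : List String)
    (r : PySem.Dict String Int) (hnd : ds.Nodup) (hfresh : ∀ d ∈ ds, r.contains d = false) :
    (ds.foldl (fun result d => if p d then PySem.Dict.modify result d 0 (· + 1) else result) r).items
      = r.items ++ (ds.filter (fun d => decide (p d))).map (fun d => (d, (1 : Int))) := by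
  induction ds generalizing r with
  | nil => simp
  | cons d ds ih =>
    have hfd : r.contains d = false := hfresh d (List.mem_cons_self ..)
    have hnd' : ds.Nodup := hnd.of_cons
    have hdn : d ∉ ds := (List.nodup_cons.mp hnd).1
    simp only [List.foldl_cons]
    by_cases hp : p d
    · rw [if_pos hp]
      have hmod : (PySem.Dict.modify r d 0 (· + 1)).items = r.items ++ [(d, (1 : Int))] := by
        rw [PySem.Dict.modify, PySem.Dict.getD_of_not_contains r 0 hfd]
        exact PySem.Dict.items_insert_of_not_contains r _ hfd
      rw [ih _ hnd' ?_, hmod]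
      · simp [hp]
      · intro x hx
        rw [PySem.Dict.modify, PySem.Dict.contains_insert]
        have hxd : x ≠ d := fun h => hdn (h ▸ hx)
        simp [hxd, hfresh x (List.mem_cons_of_mem _ hx)]
    · rw [if_neg hp, ih _ hnd' (fun x hx => hfresh x (List.mem_cons_of_mem _ hx))]
      simp [hp]

theorem pvDirectives_nodup : pvDirectives.Nodup := by
  simp [pvDirectives, List.nodup_cons]

theorem pvDirectives_word : ∀ d ∈ pvDirectives, ∀ c ∈ d.toList, pvIsWordChar c = true := by
  intro d hd
  have h : (pvDirectives.all (fun d => d.toList.all pvIsWordChar)) = true := by decide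
  exact fun c hc => List.all_eq_true.mp (List.all_eq_true.mp h d hd) c hc

-- ===== VERDICT (by name: the statement is the Claim_ definition above) =====
theorem count_schedule_directives_spec : Claim_equal_count_schedule_directives := by
  intro line _
  unfold Spec_count_schedule_directives count_schedule_directives count_schedule_directives_alt
  rw [pvFold_items (fun d => 0 < PySem.Str.count line ("." ++ d ++ "(")) pvDirectives
      PySem.Dict.empty pvDirectives_nodup (fun d _ => PySem.Dict.contains_empty d)]
  rw [show (PySem.Dict.empty : PySem.Dict String Int).items = [] from rfl, List.nil_append]
  exact congrArg _ (List.filter_congr (fun d hd => pvCond_eq line d (pvDirectives_word d hd)))
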